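-- pv_equiv track=rewrite | github.com/Imeneallouche/MITRE-ATTACK-for-ICS-Techniques-and-Mitigations-Prioritization-Engine | utils/attack_chain.py | aggregate_occurrences
-- ===== SOURCE A (Python) =====
-- from collections import Counter
-- from typing import Any, List, Sequence, Tuple, Union, Dict
--
-- def aggregate_occurrences(chain: Sequence[str]) -> Tuple[List[str], Dict[str, int]]:
--     """
--     Return unique technique ids in first-seen order, and count of each id in the chain.
--     """
--     order: List[str] = []
--     seen = set()
--     for tid in chain:
--         if tid not in seen:
--             seen.add(tid)
--             order.append(tid)
--     counts = Counter(chain)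
--     return order, dict(counts)
-- ===== SOURCE B (Python) =====
-- from typing import Dict, List, Sequence, Tuple
--
-- def aggregate_occurrences(chain: Sequence[str]) -> Tuple[List[str], Dict[str, int]]:
--     """dict.fromkeys gives the first-seen dedup; each count is a per-key
--     scan of the chain instead of a streaming tally."""
--     order = list(dict.fromkeys(chain))
--     return order, {tid: chain.count(tid) for tid in order}
-- ===== Notes on version B (the rewrite author's own statement) =====
-- stated objective: idiomatic
-- what changed: Replaces A's explicit seen-set loop and Counter streaming tally by dict.fromkeys for the ordered dedup and a per-key chain.count scan building the counts dict by comprehension, so no accumulator loop remains.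
import Mathlib
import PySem

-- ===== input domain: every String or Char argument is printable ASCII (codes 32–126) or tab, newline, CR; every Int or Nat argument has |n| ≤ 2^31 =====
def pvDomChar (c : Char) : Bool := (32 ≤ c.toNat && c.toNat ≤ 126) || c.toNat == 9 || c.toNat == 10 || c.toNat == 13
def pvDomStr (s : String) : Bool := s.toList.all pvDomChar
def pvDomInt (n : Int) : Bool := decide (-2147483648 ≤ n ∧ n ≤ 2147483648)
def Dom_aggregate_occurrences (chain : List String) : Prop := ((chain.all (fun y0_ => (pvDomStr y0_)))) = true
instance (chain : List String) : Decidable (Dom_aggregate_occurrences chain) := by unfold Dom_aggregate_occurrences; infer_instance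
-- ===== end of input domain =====

-- B replaces A's seen-set loop + Counter tally by dict.fromkeys dedup plus per-key
-- chain.count scans; objective: idiomatic. Proven equal on all inputs (both total).


-- ===== PORT A =====
-- order/seen dedup loop, then Counter(chain) (= PySem.Dict.counter), then dict(counts).items
def aggregate_occurrences (chain : List String) : List String × (List (String × Int)) :=
  let os := chain.foldl (fun (st : List String × PySem.Set String) tid =>
      if PySem.Set.contains st.2 tid then st
      else (st.1 ++ [tid], PySem.Set.add st.2 tid)) ([], PySem.Set.empty)
  let counts : PySem.Dict String Int := PySem.Dict.counter chain
  (os.1, counts.items)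

-- ===== PORT B =====
-- dict.fromkeys dedup (= PySem.List.dedup), then dict comprehension over order
-- with chain.count(tid) (= a foldl of Dict.insert, one count scan per key)
def aggregate_occurrences_alt (chain : List String) : List String × (List (String × Int)) :=
  let order := PySem.List.dedup chain
  (order,
   (order.foldl (fun (d : PySem.Dict String Int) tid =>
      d.insert tid (PySem.List.count chain tid : Int)) PySem.Dict.empty).items)

-- ===== PRECONDITION & SPEC =====
def Spec_aggregate_occurrences (chain : List String) (out : List String × (List (String × Int))) : Prop := out = aggregate_occurrences_alt chain
instance (chain : List String) (out : List String × (List (String × Int))) : Decidable (Spec_aggregate_occurrences chain out) := by unfold Spec_aggregate_occurrences; infer_instance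

-- ===== CLAIM (what is proved, stated in full; the proofs are below) =====
def Claim_equal_aggregate_occurrences : Prop := ∀ (chain : List String), Dom_aggregate_occurrences chain → Spec_aggregate_occurrences chain (aggregate_occurrences chain)

-- ===== LEMMAS AND PROOFS =====

-- A's dedup loop keeps order = seen as lists, so it is the Set.add fold.
theorem aggA_fold (chain : List String) (s : List String) :
    chain.foldl (fun (st : List String × PySem.Set String) tid =>
      if PySem.Set.contains st.2 tid then st
      else (st.1 ++ [tid], PySem.Set.add st.2 tid)) (s, s)
    = (chain.foldl PySem.Set.add s, chain.foldl PySem.Set.add s) := by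
  induction chain generalizing s with
  | nil => rfl
  | cons x xs ih =>
      by_cases hx : x ∈ s
      · have h : PySem.Set.contains s x = true := by simpa [PySem.Set.contains] using hx
        simp only [List.foldl, h, if_true]
        rw [show PySem.Set.add s x = s by simp [PySem.Set.add, hx]]
        exact ih s
      · have h : PySem.Set.contains s x = false := by simpa [PySem.Set.contains] using hx
        simp only [List.foldl, h, Bool.false_eq_true, if_false]
        rw [show PySem.Set.add s x = s ++ [x] by simp [PySem.Set.add, hx]]
        exact ih (s ++ [x])

-- ===== VERDICT (by name: the statement is the Claim_ definition above) =====
theorem aggregate_occurrences_spec : Claim_equal_aggregate_occurrences := by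
  intro chain _
  unfold Spec_aggregate_occurrences aggregate_occurrences aggregate_occurrences_alt
  dsimp only
  rw [show (PySem.Set.empty : PySem.Set String) = ([] : List String) from rfl,
      aggA_fold chain [], PySem.Dict.items_counter,
      PySem.List.dedup_eq_ofList,
      PySem.Dict.items_foldl_insert_fresh (PySem.Set.ofList chain)
        (fun t => t) (fun t => (PySem.List.count chain t : Int)) PySem.Dict.empty
        (fun _ _ => rfl) (by simp [PySem.Set.nodup_ofList])]
  simp [PySem.Set.ofList_eq_foldl, PySem.List.count, PySem.Dict.empty]
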